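-- pv_equiv track=rewrite | github.com/Fsbsnw/Problem-Solving | 프로그래머스/1/135808. 과일 장수/과일 장수.py | solution
-- ===== SOURCE A (Python) =====
-- def solution(k, m, score):
--     temp = 0
--     cnt = 0
--     score.sort(reverse=True)
--     for i in score:
--         cnt += 1
--         if cnt == m:
--             cnt = 0
--             temp += i * m
--     return temp
-- ===== SOURCE B (Python) =====
-- def solution(k, m, score):
--     a = sorted(score)
--     total = 0
--     j = len(a) - m
--     while m > 0 and j >= 0:
--         total += a[j]
--         j -= m
--     return total * m
-- ===== Notes on version B (the rewrite author's own statement) =====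
-- stated objective: alternative
-- what changed: Instead of A's descending sort followed by a counter-driven scan of all n elements that multiplies each group minimum by m as it goes, B sorts ascending and strides an index backward by m, visiting only the ~n/m group minima and multiplying the accumulated sum by m once at the end.
import Mathlib
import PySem

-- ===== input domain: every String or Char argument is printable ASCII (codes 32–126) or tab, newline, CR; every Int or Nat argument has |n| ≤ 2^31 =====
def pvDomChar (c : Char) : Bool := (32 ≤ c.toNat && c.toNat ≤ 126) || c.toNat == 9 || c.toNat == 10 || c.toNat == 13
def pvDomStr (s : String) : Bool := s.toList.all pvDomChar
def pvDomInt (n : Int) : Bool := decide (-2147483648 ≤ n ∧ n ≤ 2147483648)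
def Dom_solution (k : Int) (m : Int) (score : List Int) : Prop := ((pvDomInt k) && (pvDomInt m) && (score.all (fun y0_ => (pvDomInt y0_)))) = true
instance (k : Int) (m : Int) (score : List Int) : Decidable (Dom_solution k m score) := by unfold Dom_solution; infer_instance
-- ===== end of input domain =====

-- B replaces A's descending sort + per-element group counter by an ascending sort with a
-- backward index stride of m (visiting only the n/m group minima) and one final multiply.
-- (A sorts its 'score' argument in place; the equivalence proved here is about the return value only.)

-- ===== PORT A =====
-- loop body of A's for-loop: state (temp, cnt)
def stepA (m : Int) (st : Int × Int) (i : Int) : Int × Int :=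
  let cnt := st.2 + 1
  if cnt = m then (st.1 + i * m, 0) else (st.1, cnt)

def solution (k : Int) (m : Int) (score : List Int) : Int :=
  let s := PySem.List.sorted score (fun x => x) true
  (s.foldl (stepA m) (0, 0)).1

-- ===== PORT B =====
-- B's while loop: j strides down by m while m > 0 and j >= 0, accumulating a[j]
def loopB (a : List Int) (m : Int) (j : Int) (total : Int) : Int :=
  if h : 0 < m ∧ 0 ≤ j then
    loopB a m (j - m) (total + PySem.List.pyGetD a j 0)
  else total
termination_by (j + 1).toNat
decreasing_by omega

def solution_alt (k : Int) (m : Int) (score : List Int) : Int :=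
  let a := PySem.List.sorted score (fun x => x) false
  loopB a m ((a.length : Int) - m) 0 * m

-- ===== PRECONDITION & SPEC =====
def Spec_solution (k : Int) (m : Int) (score : List Int) (out : Int) : Prop := out = solution_alt k m score
instance (k : Int) (m : Int) (score : List Int) (out : Int) : Decidable (Spec_solution k m score out) := by unfold Spec_solution; infer_instance

-- ===== CLAIM (what is proved, stated in full; the proofs are below) =====
def Claim_equal_solution : Prop := ∀ (k : Int) (m : Int) (score : List Int), Dom_solution k m score → Spec_solution k m score (solution k m score)

-- ===== LEMMAS AND PROOFS =====

-- A's loop without the accumulator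
def G (m : Int) : List Int → Int → Int
  | [], _ => 0
  | x :: xs, c => if c + 1 = m then x * m + G m xs 0 else G m xs (c + 1)

theorem foldA_eq (m : Int) (L : List Int) : ∀ (t c : Int),
    (L.foldl (stepA m) (t, c)).1 = t + G m L c := by
  induction L with
  | nil => intro t c; simp [G]
  | cons x xs ih =>
    intro t c
    simp only [List.foldl_cons, stepA, G]
    by_cases h : c + 1 = m
    · simp [h, ih]; ring
    · simp [h, ih]

theorem G_nonpos (m : Int) (hm : m ≤ 0) (L : List Int) : ∀ c : Int, 0 ≤ c → G m L c = 0 := by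
  induction L with
  | nil => intro c _; simp [G]
  | cons x xs ih =>
    intro c hc
    have h : ¬ (c + 1 = m) := by omega
    simp [G, h, ih (c + 1) (by omega)]

-- closed form of A's loop over the descending list
theorem G_closed (m' : Nat) (hm : 0 < m') (L : List Int) : ∀ c : Nat, c < m' →
    G (m' : Int) L (c : Int) =
      (m' : Int) * ∑ t ∈ Finset.range ((L.length + c) / m'), L.getD ((t + 1) * m' - 1 - c) 0 := by
  induction L with
  | nil =>
    intro c hc
    simp [G, Nat.div_eq_of_lt hc]
  | cons x xs ih =>
    intro c hc
    by_cases h : c + 1 = m'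
    · have hcast : ((c : Int) + 1 = (m' : Int)) := by exact_mod_cast h
      have hG : G (m' : Int) (x :: xs) (c : Int) = x * (m' : Int) + G (m' : Int) xs 0 := by
        simp [G, hcast]
      have hih := ih 0 hm
      rw [Nat.cast_zero] at hih
      rw [hG, hih]
      have hlen : ((x :: xs).length + c) / m' = xs.length / m' + 1 := by
        have e : (x :: xs).length + c = xs.length + m' := by
          simp only [List.length_cons]; omega
        rw [e, Nat.add_div_right _ hm]
      rw [hlen, Finset.sum_range_succ']
      have hf0 : (x :: xs).getD ((0 + 1) * m' - 1 - c) 0 = x := by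
        have : (0 + 1) * m' - 1 - c = 0 := by omega
        rw [this]; rfl
      have hfs : ∀ i : Nat, (x :: xs).getD ((i + 1 + 1) * m' - 1 - c) 0
          = xs.getD ((i + 1) * m' - 1 - 0) 0 := by
        intro i
        have e1 : (i + 1 + 1) * m' = (i + 1) * m' + m' := by ring
        have e2 : 1 ≤ (i + 1) * m' := Nat.one_le_iff_ne_zero.2 (by positivity)
        have e3 : (i + 1 + 1) * m' - 1 - c = ((i + 1) * m' - 1 - 0) + 1 := by omega
        rw [e3, List.getD_cons_succ]
      simp only [hf0, hfs, Nat.add_zero, Nat.sub_zero]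
      ring
    · have hcast : ¬ ((c : Int) + 1 = (m' : Int)) := by exact_mod_cast h
      have hG : G (m' : Int) (x :: xs) (c : Int) = G (m' : Int) xs ((c : Int) + 1) := by
        simp [G, hcast]
      have hc1 : ((c : Int) + 1) = (((c + 1 : Nat)) : Int) := by push_cast; ring
      rw [hG, hc1, ih (c + 1) (by omega)]
      have hlen : ((x :: xs).length + c) / m' = (xs.length + (c + 1)) / m' := by
        simp only [List.length_cons]; congr 1; omega
      rw [hlen]
      congr 1
      apply Finset.sum_congr rfl
      intro t _
      have e2 : m' ≤ (t + 1) * m' := Nat.le_mul_of_pos_left m' (by omega)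
      have e3 : (t + 1) * m' - 1 - c = ((t + 1) * m' - 1 - (c + 1)) + 1 := by omega
      rw [e3, List.getD_cons_succ]

-- closed form of B's loop
theorem loopB_closed (a : List Int) (m' : Nat) (hm : 0 < m') : ∀ (j : Nat) (t : Int),
    loopB a (m' : Int) (j : Int) t =
      t + ∑ t' ∈ Finset.range (j / m' + 1), a.getD (j - t' * m') 0 := by
  intro j
  induction j using Nat.strong_induction_on with
  | _ j ih =>
    intro t
    rw [loopB]
    have hmi : (0 : Int) < (m' : Int) := by exact_mod_cast hm
    rw [dif_pos ⟨hmi, by positivity⟩]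
    by_cases hj : j < m'
    · rw [loopB]
      have hneg : ¬ (0 < (m' : Int) ∧ 0 ≤ (j : Int) - (m' : Int)) := by
        rintro ⟨-, habs⟩
        have : (j : Int) < (m' : Int) := by exact_mod_cast hj
        omega
      rw [dif_neg hneg, Nat.div_eq_of_lt hj]
      simp
    · have hle : m' ≤ j := Nat.le_of_not_lt hj
      have e : (j : Int) - (m' : Int) = ((j - m' : Nat) : Int) := by
        push_cast [hle]; ring
      rw [e, ih (j - m') (by omega) (t + PySem.List.pyGetD a (j : Int) 0)]
      have hdiv : j / m' = (j - m') / m' + 1 := by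
        rw [Nat.div_eq j m']; simp [hm, hle]
      rw [hdiv]
      conv_rhs => rw [Finset.sum_range_succ']
      have hfs : ∀ i : Nat, a.getD (j - (i + 1) * m') 0 = a.getD ((j - m') - i * m') 0 := by
        intro i
        have e1 : (i + 1) * m' = m' + i * m' := by ring
        have e2 : j - (i + 1) * m' = (j - m') - i * m' := by omega
        rw [e2]
      simp only [hfs, Nat.zero_mul, Nat.sub_zero, PySem.List.pyGetD_natCast]
      ring

theorem sorted_desc_eq_reverse (xs : List Int) :
    PySem.List.sorted xs (fun x => x) true = (PySem.List.sorted xs (fun x => x) false).reverse := by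
  have hperm : (PySem.List.sorted xs (fun x : Int => x) true).Perm
      ((PySem.List.sorted xs (fun x : Int => x) false).reverse) :=
    (PySem.List.sorted_perm _ _ _).trans
      (((PySem.List.sorted_perm xs (fun x => x) false).symm).trans
        (List.reverse_perm _).symm)
  exact List.Perm.eq_of_pairwise (le := fun a b : Int => b ≤ a)
    (fun a b _ _ h1 h2 => le_antisymm h2 h1)
    (PySem.List.sorted_pairwise_rev xs (fun x => x))
    ((List.pairwise_reverse).2 (PySem.List.sorted_pairwise xs (fun x => x)))
    hperm

theorem main_eq (m : Int) (score : List Int) : solution 0 m score = solution_alt 0 m score := by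
  show ((PySem.List.sorted score (fun x => x) true).foldl (stepA m) (0, 0)).1
      = loopB (PySem.List.sorted score (fun x => x) false) m
          (((PySem.List.sorted score (fun x => x) false).length : Int) - m) 0 * m
  rw [sorted_desc_eq_reverse, foldA_eq, zero_add]
  generalize PySem.List.sorted score (fun x => x) false = a
  by_cases hm : 0 < m
  · lift m to Nat using le_of_lt hm with m'
    have hm'pos : 0 < m' := by exact_mod_cast hm
    have hrl : a.reverse.length = a.length := List.length_reverse
    have hG := G_closed m' hm'pos a.reverse 0 hm'pos
    rw [Nat.cast_zero] at hG
    by_cases hnm : a.length < m'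
    · have hneg : ¬ (0 < (m' : Int) ∧ 0 ≤ (a.length : Int) - (m' : Int)) := by
        rintro ⟨-, habs⟩
        have : (a.length : Int) < (m' : Int) := by exact_mod_cast hnm
        omega
      rw [loopB, dif_neg hneg, hG, hrl]
      have h0 : (a.length + 0) / m' = 0 := Nat.div_eq_of_lt (by omega)
      rw [h0]
      simp
    · have hle : m' ≤ a.length := Nat.le_of_not_lt hnm
      have e : (a.length : Int) - (m' : Int) = ((a.length - m' : Nat) : Int) := by
        push_cast [hle]; ring
      rw [e, loopB_closed a m' hm'pos (a.length - m') 0, zero_add, hG, hrl]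
      have hdiv : a.length / m' = (a.length - m') / m' + 1 := by
        rw [Nat.div_eq a.length m']; simp [hm'pos, hle]
      have hcnt : (a.length + 0) / m' = (a.length - m') / m' + 1 := by
        rw [Nat.add_zero, hdiv]
      rw [hcnt]
      have hpt : ∀ t ∈ Finset.range ((a.length - m') / m' + 1),
          a.reverse.getD ((t + 1) * m' - 1 - 0) 0 = a.getD ((a.length - m') - t * m') 0 := by
        intro t ht
        have ht' : t < (a.length - m') / m' + 1 := Finset.mem_range.1 ht
        have hb : (t + 1) * m' ≤ a.length := by
          have h4 : t + 1 ≤ a.length / m' := by omega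
          calc (t + 1) * m' ≤ (a.length / m') * m' := Nat.mul_le_mul_right _ h4
            _ ≤ a.length := Nat.div_mul_le_self a.length m'
        have h1 : (t + 1) * m' - 1 - 0 < a.reverse.length := by
          rw [hrl]; have : 1 ≤ (t + 1) * m' := Nat.one_le_iff_ne_zero.2 (Nat.mul_ne_zero (by omega) (by omega))
          omega
        have e1 : (t + 1) * m' = t * m' + m' := by ring
        have h2 : (a.length - m') - t * m' < a.length := by omega
        rw [List.getD_eq_getElem _ _ h1, List.getD_eq_getElem _ _ h2]
        rw [List.getElem_reverse]
        congr 1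
        have h3 : 1 ≤ (t + 1) * m' := Nat.one_le_iff_ne_zero.2 (Nat.mul_ne_zero (by omega) (by omega))
        omega
      rw [Finset.sum_congr rfl hpt]
      ring
  · have hA : G m a.reverse 0 = 0 := G_nonpos m (by omega) _ 0 le_rfl
    have hneg : ¬ (0 < m ∧ 0 ≤ (a.length : Int) - m) := by rintro ⟨habs, -⟩; omega
    rw [hA, loopB, dif_neg hneg, zero_mul]

theorem solution_indep (k k' m : Int) (score : List Int) :
    solution k m score = solution k' m score := rfl

theorem solution_alt_indep (k k' m : Int) (score : List Int) :
    solution_alt k m score = solution_alt k' m score := rfl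

-- ===== VERDICT (by name: the statement is the Claim_ definition above) =====
theorem solution_spec : Claim_equal_solution := by
  intro k m score _
  unfold Spec_solution
  rw [solution_indep k 0, solution_alt_indep k 0]
  exact main_eq m score
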